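-- pv_equiv track=rewrite | github.com/MrChepe09/Competitive-Programming-Codes | Codechef November Challenge 2020/ADADISH.py | adadish
-- ===== SOURCE A (Python) =====
-- def adadish(n, a):
--     al, bl = 0, 0
--     a.sort()
--     for i in range(len(a)-1, -1, -1):
--         if al<=bl:
--             al+=a[i]
--         else:
--             bl += a[i]
--     return max(al, bl)
-- ===== SOURCE B (Python) =====
-- def adadish(n, a):
--     a.sort()  # same in-place mutation as A
--     e = 0
--     for x in reversed(a):
--         e = abs(x - e)
--     return (sum(a) + e) // 2
-- ===== Notes on version B (the rewrite author's own statement) =====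
-- stated objective: alternative
-- what changed: Replaces the two-accumulator branching greedy (if al<=bl ... else ..., then max) by the branch-free one-variable recurrence e = |x - e| over the descending values (e is the absolute pile gap, whatever branch the greedy would take), finishing with the closed form (sum(a)+e)//2.
import Mathlib
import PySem

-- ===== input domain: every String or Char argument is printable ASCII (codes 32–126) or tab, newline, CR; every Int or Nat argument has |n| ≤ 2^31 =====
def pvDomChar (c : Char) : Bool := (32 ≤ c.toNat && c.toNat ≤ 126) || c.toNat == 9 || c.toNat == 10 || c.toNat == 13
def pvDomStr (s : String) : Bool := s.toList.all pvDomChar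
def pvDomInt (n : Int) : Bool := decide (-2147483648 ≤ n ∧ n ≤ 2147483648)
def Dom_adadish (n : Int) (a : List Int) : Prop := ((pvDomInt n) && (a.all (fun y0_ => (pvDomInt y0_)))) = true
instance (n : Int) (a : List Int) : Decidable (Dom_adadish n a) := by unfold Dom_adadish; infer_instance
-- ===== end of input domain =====

-- B drops A's two branching accumulators and the final max: the absolute pile gap obeys the
-- branch-free recurrence e ← |x − e|, and the answer is (sum + e) // 2; equivalence is about the
-- RETURN value (both sort `a` in place).

-- ===== PORT A =====
def adadish (n : Int) (a : List Int) : Int :=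
  let s := PySem.List.sorted a (fun x => x) false
  -- for i in range(len(a)-1, -1, -1): indices are always in range, so pyGetD with default 0 is exact
  let p := (PySem.List.pyRange (PySem.List.len s - 1) (-1) (-1)).foldl
    (fun (p : Int × Int) i =>
      if p.1 ≤ p.2 then (p.1 + PySem.List.pyGetD s i 0, p.2)
      else (p.1, p.2 + PySem.List.pyGetD s i 0)) (0, 0)
  max p.1 p.2

-- ===== PORT B =====
def adadish_alt (n : Int) (a : List Int) : Int :=
  let s := PySem.List.sorted a (fun x => x) false
  -- reversed(a) iterates the sorted list back to front: List.reverse is exact here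
  let e := s.reverse.foldl (fun e x => |x - e|) 0
  PySem.Int.floordiv (s.sum + e) 2

-- ===== PRECONDITION & SPEC =====
def Spec_adadish (n : Int) (a : List Int) (out : Int) : Prop := out = adadish_alt n a
instance (n : Int) (a : List Int) (out : Int) : Decidable (Spec_adadish n a out) := by unfold Spec_adadish; infer_instance

-- ===== CLAIM =====
def Claim_equal_adadish : Prop := ∀ (n : Int) (a : List Int), Dom_adadish n a → Spec_adadish n a (adadish n a)

-- ===== LEMMAS AND PROOFS =====

-- A's index countdown fold over xs equals a fold over xs.reverse
theorem pv_fold_countdown (xs : List Int) (init : Int × Int) :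
    (PySem.List.pyRange (PySem.List.len xs - 1) (-1) (-1)).foldl
      (fun (p : Int × Int) i =>
        if p.1 ≤ p.2 then (p.1 + PySem.List.pyGetD xs i 0, p.2)
        else (p.1, p.2 + PySem.List.pyGetD xs i 0)) init
    = xs.reverse.foldl
        (fun (p : Int × Int) x => if p.1 ≤ p.2 then (p.1 + x, p.2) else (p.1, p.2 + x)) init := by
  have h1 : PySem.List.pyRange (PySem.List.len xs - 1) (-1) (-1)
      = (PySem.List.pyRange 0 (PySem.List.len xs) 1).reverse := by
    rw [PySem.List.pyRange_neg_one_eq_reverse]; norm_num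
  rw [h1, ← List.foldl_map (f := fun i => PySem.List.pyGetD xs i 0)
        (g := fun (p : Int × Int) x => if p.1 ≤ p.2 then (p.1 + x, p.2) else (p.1, p.2 + x)),
      List.map_reverse,
      show (PySem.List.pyRange 0 (PySem.List.len xs) 1).map (fun i => PySem.List.pyGetD xs i 0) = xs
        from by simpa using PySem.List.map_pyGetD_pyRange_zero (xs := xs) (d := 0)]

-- invariant: the absolute gap of A's pair fold obeys B's branch-free |x − e| recurrence,
-- and the pair sum is the list sum
theorem pv_fold_inv (l : List Int) (p : Int × Int) :
    |(l.foldl (fun (p : Int × Int) x => if p.1 ≤ p.2 then (p.1 + x, p.2) else (p.1, p.2 + x)) p).1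
      - (l.foldl (fun (p : Int × Int) x => if p.1 ≤ p.2 then (p.1 + x, p.2) else (p.1, p.2 + x)) p).2|
      = l.foldl (fun e x => |x - e|) |p.1 - p.2|
    ∧ (l.foldl (fun (p : Int × Int) x => if p.1 ≤ p.2 then (p.1 + x, p.2) else (p.1, p.2 + x)) p).1
      + (l.foldl (fun (p : Int × Int) x => if p.1 ≤ p.2 then (p.1 + x, p.2) else (p.1, p.2 + x)) p).2
      = p.1 + p.2 + l.sum := by
  induction l generalizing p with
  | nil => simp
  | cons x t ih =>
    simp only [List.foldl_cons, List.sum_cons]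
    by_cases h : p.1 ≤ p.2
    · have hd : |p.1 - p.2| = p.2 - p.1 := by rw [abs_of_nonpos (by omega : p.1 - p.2 ≤ 0)]; ring
      have := ih (p.1 + x, p.2)
      simp only [if_pos h]
      refine ⟨?_, by rw [this.2]; ring⟩
      rw [this.1, hd]
      congr 1
      congr 1
      ring
    · have hd : |p.1 - p.2| = p.1 - p.2 := abs_of_nonneg (by omega)
      have := ih (p.1, p.2 + x)
      simp only [if_neg h]
      refine ⟨?_, by rw [this.2]; ring⟩
      rw [this.1, hd]
      congr 1
      rw [abs_sub_comm]
      congr 1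
      ring

-- ===== VERDICT =====
theorem adadish_spec : Claim_equal_adadish := by
  intro n a _
  unfold Spec_adadish adadish adadish_alt
  dsimp only
  set s := PySem.List.sorted a (fun x => x) false with hs
  rw [pv_fold_countdown s ((0 : Int), (0 : Int))]
  obtain ⟨h1, h2⟩ := pv_fold_inv s.reverse ((0 : Int), (0 : Int))
  set q := s.reverse.foldl (fun (p : Int × Int) x => if p.1 ≤ p.2 then (p.1 + x, p.2) else (p.1, p.2 + x)) ((0:Int), (0:Int))
  simp only [zero_add, sub_zero, abs_zero, List.sum_reverse] at h1 h2
  rw [← h1]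
  rw [PySem.Int.floordiv_eq_ediv_of_pos (by omega)]
  rcases abs_cases (q.1 - q.2) with ⟨he, _⟩ | ⟨he, _⟩ <;> rw [he] <;> omega
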